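-- pv_equiv track=rewrite | github.com/sergiocalazans/RaciocinioAlgoritmico | Listas de Exercícios/#5/Exercicio 5.py | filtrar_matriz
-- ===== SOURCE A (Python) =====
-- def filtrar_matriz(matriz, tipo):
--     filtrada = []
--     soma = 0
--     for i in range(len(matriz)):
--         linha = []
--         for j in range(len(matriz[i])):
--             valor = matriz[i][j]
--             if tipo == 'a' and (i == 2 or j == 2):  # cruz
--                 linha.append(valor)
--                 soma += valor
--             elif tipo == 'b' and (i == 0 or i == 4 or j == 0 or j == 4):  # moldura
--                 linha.append(valor)
--                 soma += valor
--             elif tipo == 'c' and (i == j or i + j == 4):  # diagonais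
--                 linha.append(valor)
--                 soma += valor
--             elif tipo == 'd' and (i + j) % 2 == 0:  # tabuleiro de xadrez
--                 linha.append(valor)
--                 soma += valor
--             else:
--                 linha.append(0)
--         filtrada.append(linha)
--     return filtrada, soma
-- ===== SOURCE B (Python) =====
-- def filtrar_matriz(matriz, tipo):
--     # Instead of testing every cell against the pattern, generate the kept
--     # column indices of each row directly (sparse coordinates) and scatter
--     # them into a zero row, accumulating the sum of the scattered values.
--     def cols(i, m):
--         # increasing, duplicate-free list of kept columns in row i (width m)
--         if tipo == 'a':    # cruz: whole row 2, otherwise only column 2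
--             return list(range(m)) if i == 2 else ([2] if 2 < m else [])
--         if tipo == 'b':    # moldura: whole rows 0 and 4, otherwise columns 0 and 4
--             return list(range(m)) if i in (0, 4) else [c for c in (0, 4) if c < m]
--         if tipo == 'c':    # diagonais: columns i and 4-i
--             base = [i] if i == 4 - i else [min(i, 4 - i), max(i, 4 - i)]
--             return [j for j in base if 0 <= j < m]
--         if tipo == 'd':    # xadrez: every other column, starting at i % 2
--             return list(range(i % 2, m, 2))
--         return []
--     filtrada = []
--     soma = 0
--     for i, row in enumerate(matriz):
--         nova = [0] * len(row)
--         for j in cols(i, len(row)):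
--             nova[j] = row[j]
--             soma += row[j]
--         filtrada.append(nova)
--     return filtrada, soma
-- ===== Notes on version B (the rewrite author's own statement) =====
-- stated objective: faster
-- what changed: Instead of A's per-cell predicate test inside nested index loops with a threaded sum, B generates for each row the kept column indices in closed form per pattern (a full row, the fixed columns {2} or {0,4}, the two diagonal positions i and 4-i, or a stride-2 range) and scatters those sparse coordinates into a pre-allocated zero row, summing only the scattered values.
import Mathlib
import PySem

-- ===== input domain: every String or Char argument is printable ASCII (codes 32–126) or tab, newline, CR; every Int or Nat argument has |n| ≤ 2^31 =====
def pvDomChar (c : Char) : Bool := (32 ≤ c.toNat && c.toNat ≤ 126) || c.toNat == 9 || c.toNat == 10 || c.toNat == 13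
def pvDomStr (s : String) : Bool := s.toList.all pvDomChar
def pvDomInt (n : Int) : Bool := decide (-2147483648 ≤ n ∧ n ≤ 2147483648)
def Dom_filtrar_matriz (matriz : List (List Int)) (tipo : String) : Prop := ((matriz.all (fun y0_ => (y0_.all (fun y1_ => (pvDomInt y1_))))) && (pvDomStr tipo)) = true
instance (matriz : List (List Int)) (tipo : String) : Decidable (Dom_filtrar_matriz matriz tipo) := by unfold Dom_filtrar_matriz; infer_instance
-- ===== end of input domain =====

set_option maxRecDepth 4096


-- B replaces A's per-cell predicate test with per-row closed-form kept-column index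
-- lists scattered into a pre-allocated zero row (measured constant-factor speedup).

-- ===== PORT A =====
-- literal transliteration of A: index loops over range(len(...)), one accumulated
-- state (filtrada, soma), the if/elif chain in A's order.
def filtrar_matriz (matriz : List (List Int)) (tipo : String) : List (List Int) × Int :=
  (PySem.List.pyRange 0 (PySem.List.len matriz) 1).foldl
    (fun (st : List (List Int) × Int) i =>
      let linha_soma :=
        (PySem.List.pyRange 0 (PySem.List.len (PySem.List.pyGetD matriz i [])) 1).foldl
          (fun (st2 : List Int × Int) j =>
            let valor := PySem.List.pyGetD (PySem.List.pyGetD matriz i []) j 0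
            if tipo = "a" ∧ (i = 2 ∨ j = 2) then (st2.1 ++ [valor], st2.2 + valor)
            else if tipo = "b" ∧ (i = 0 ∨ i = 4 ∨ j = 0 ∨ j = 4) then (st2.1 ++ [valor], st2.2 + valor)
            else if tipo = "c" ∧ (i = j ∨ i + j = 4) then (st2.1 ++ [valor], st2.2 + valor)
            else if tipo = "d" ∧ PySem.Int.mod (i + j) 2 = 0 then (st2.1 ++ [valor], st2.2 + valor)
            else (st2.1 ++ [0], st2.2))
          ([], st.2)
      (st.1 ++ [linha_soma.1], linha_soma.2))
    ([], 0)

-- ===== PORT B =====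
-- cols(i, m) of Source B: the kept column indices of row i, an increasing duplicate-free list
def pvCols (tipo : String) (i m : Int) : List Int :=
  if tipo = "a" then
    if i == 2 then PySem.List.pyRange 0 m 1 else if 2 < m then [2] else []
  else if tipo = "b" then
    if i == 0 || i == 4 then PySem.List.pyRange 0 m 1 else [0, 4].filter (fun c => c < m)
  else if tipo = "c" then
    (if i == 4 - i then [i] else [min i (4 - i), max i (4 - i)]).filter (fun j => 0 ≤ j && j < m)
  else if tipo = "d" then
    PySem.List.pyRange (PySem.Int.mod i 2) m 2
  else []

-- 'nova[j] = row[j]' is pySetD: exact here because every j in pvCols is in range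
def filtrar_matriz_alt (matriz : List (List Int)) (tipo : String) : List (List Int) × Int :=
  (PySem.List.enumerate matriz).foldl
    (fun (st : List (List Int) × Int) p =>
      let nova_soma :=
        (pvCols tipo p.1 (PySem.List.len p.2)).foldl
          (fun (st2 : List Int × Int) j =>
            (PySem.List.pySetD st2.1 j (PySem.List.pyGetD p.2 j 0),
             st2.2 + PySem.List.pyGetD p.2 j 0))
          (List.replicate p.2.length 0, st.2)
      (st.1 ++ [nova_soma.1], nova_soma.2))
    ([], 0)

-- ===== PRECONDITION & SPEC =====
def Spec_filtrar_matriz (matriz : List (List Int)) (tipo : String) (out : List (List Int) × Int) : Prop := out = filtrar_matriz_alt matriz tipo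
instance (matriz : List (List Int)) (tipo : String) (out : List (List Int) × Int) : Decidable (Spec_filtrar_matriz matriz tipo out) := by unfold Spec_filtrar_matriz; infer_instance

-- ===== CLAIM (what is proved, stated in full; the proofs are below) =====
def Claim_equal_filtrar_matriz : Prop := ∀ (matriz : List (List Int)) (tipo : String), Dom_filtrar_matriz matriz tipo → Spec_filtrar_matriz matriz tipo (filtrar_matriz matriz tipo)

-- ===== LEMMAS AND PROOFS =====

-- proof-side vocabulary: the keep-predicate both programs realize, and the masked row
def pvKeep (tipo : String) (i j : Int) : Bool :=
  if tipo = "a" then i == 2 || j == 2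
  else if tipo = "b" then i == 0 || i == 4 || j == 0 || j == 4
  else if tipo = "c" then i == j || i + j == 4
  else if tipo = "d" then PySem.Int.mod (i + j) 2 == 0
  else false

def pvMask (tipo : String) (i : Int) (row : List Int) : List Int :=
  (PySem.List.enumerate row).map (fun q => if pvKeep tipo i q.1 then q.2 else 0)

-- A's if/elif chain appends and adds exactly (if keep then valor else 0).
theorem pvStepA_eq (tipo : String) (i j valor : Int) (st2 : List Int × Int) :
    (if tipo = "a" ∧ (i = 2 ∨ j = 2) then (st2.1 ++ [valor], st2.2 + valor)
     else if tipo = "b" ∧ (i = 0 ∨ i = 4 ∨ j = 0 ∨ j = 4) then (st2.1 ++ [valor], st2.2 + valor)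
     else if tipo = "c" ∧ (i = j ∨ i + j = 4) then (st2.1 ++ [valor], st2.2 + valor)
     else if tipo = "d" ∧ PySem.Int.mod (i + j) 2 = 0 then (st2.1 ++ [valor], st2.2 + valor)
     else (st2.1 ++ [0], st2.2))
    = (st2.1 ++ [if pvKeep tipo i j then valor else 0],
       st2.2 + (if pvKeep tipo i j then valor else 0)) := by
  by_cases ha : tipo = "a" <;> by_cases hb : tipo = "b" <;> by_cases hc : tipo = "c" <;>
    by_cases hd : tipo = "d" <;> simp_all [pvKeep] <;> split_ifs <;> simp_all

-- the inner loop of A, over an enumerated row, builds the masked row and adds its sum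
theorem pvInner_eq (tipo : String) (i : Int) (row : List Int) :
    ∀ (s : Int) (acc : List Int) (soma : Int),
    (PySem.List.enumerate row s).foldl
      (fun (st2 : List Int × Int) (q : Int × Int) =>
        (st2.1 ++ [if pvKeep tipo i q.1 then q.2 else 0],
         st2.2 + (if pvKeep tipo i q.1 then q.2 else 0)))
      (acc, soma)
    = (acc ++ (PySem.List.enumerate row s).map (fun q => if pvKeep tipo i q.1 then q.2 else 0),
       soma + ((PySem.List.enumerate row s).map (fun q => if pvKeep tipo i q.1 then q.2 else 0)).sum) := by
  induction row with
  | nil => intro s acc soma; simp [PySem.List.enumerate_nil]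
  | cons v row ih =>
      intro s acc soma
      simp only [PySem.List.enumerate_cons, List.foldl_cons, List.map_cons, List.sum_cons]
      rw [ih]
      simp [add_assoc]

-- generic outer loop: append g(p) and add its sum, over any list
theorem pvOuterMap (g : Int × List Int → List Int) :
    ∀ (l : List (Int × List Int)) (acc : List (List Int)) (s : Int),
    l.foldl (fun (st : List (List Int) × Int) p => (st.1 ++ [g p], st.2 + (g p).sum)) (acc, s)
    = (acc ++ l.map g, s + ((l.map g).map List.sum).sum) := by
  intro l
  induction l with
  | nil => intro acc s; simp
  | cons p l ih =>
      intro acc s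
      simp only [List.foldl_cons, List.map_cons, List.sum_cons]
      rw [ih]
      simp [add_assoc]

-- A in closed form: the masked matrix and the sum of its row sums
theorem pvA_closed (matriz : List (List Int)) (tipo : String) :
    filtrar_matriz matriz tipo
    = ((PySem.List.enumerate matriz).map (fun p => pvMask tipo p.1 p.2),
       (((PySem.List.enumerate matriz).map (fun p => pvMask tipo p.1 p.2)).map List.sum).sum) := by
  have h1 : filtrar_matriz matriz tipo =
      (PySem.List.enumerate matriz).foldl
        (fun (st : List (List Int) × Int) (p : Int × List Int) =>
          let linha_soma :=
            (PySem.List.enumerate p.2).foldl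
              (fun (st2 : List Int × Int) (q : Int × Int) =>
                (st2.1 ++ [if pvKeep tipo p.1 q.1 then q.2 else 0],
                 st2.2 + (if pvKeep tipo p.1 q.1 then q.2 else 0)))
              ([], st.2)
          (st.1 ++ [linha_soma.1], linha_soma.2))
        ([], 0) := by
    unfold filtrar_matriz
    rw [PySem.List.enumerate_eq_map_pyRange matriz ([] : List Int), List.foldl_map]
    apply PySem.List.foldl_congr_mem
    intro st i _
    simp only []
    rw [PySem.List.enumerate_eq_map_pyRange (PySem.List.pyGetD matriz i []) (0 : Int),
        List.foldl_map]
    have h2 := PySem.List.foldl_congr_mem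
      (PySem.List.pyRange 0 (PySem.List.len (PySem.List.pyGetD matriz i [])))
      (fun (st2 : List Int × Int) j =>
        let valor := PySem.List.pyGetD (PySem.List.pyGetD matriz i []) j 0
        if tipo = "a" ∧ (i = 2 ∨ j = 2) then (st2.1 ++ [valor], st2.2 + valor)
        else if tipo = "b" ∧ (i = 0 ∨ i = 4 ∨ j = 0 ∨ j = 4) then (st2.1 ++ [valor], st2.2 + valor)
        else if tipo = "c" ∧ (i = j ∨ i + j = 4) then (st2.1 ++ [valor], st2.2 + valor)
        else if tipo = "d" ∧ PySem.Int.mod (i + j) 2 = 0 then (st2.1 ++ [valor], st2.2 + valor)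
        else (st2.1 ++ [0], st2.2))
      (fun (st2 : List Int × Int) j =>
        (st2.1 ++ [if pvKeep tipo i j then PySem.List.pyGetD (PySem.List.pyGetD matriz i []) j 0 else 0],
         st2.2 + (if pvKeep tipo i j then PySem.List.pyGetD (PySem.List.pyGetD matriz i []) j 0 else 0)))
      ([], st.2)
      (by intro acc j _; exact pvStepA_eq tipo i j _ acc)
    rw [h2]
  rw [h1]
  have h3 : ∀ (st : List (List Int) × Int) (p : Int × List Int),
      (fun (st : List (List Int) × Int) (p : Int × List Int) =>
        let linha_soma :=
          (PySem.List.enumerate p.2).foldl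
            (fun (st2 : List Int × Int) (q : Int × Int) =>
              (st2.1 ++ [if pvKeep tipo p.1 q.1 then q.2 else 0],
               st2.2 + (if pvKeep tipo p.1 q.1 then q.2 else 0)))
            ([], st.2)
        (st.1 ++ [linha_soma.1], linha_soma.2)) st p
      = (st.1 ++ [pvMask tipo p.1 p.2], st.2 + (pvMask tipo p.1 p.2).sum) := by
    intro st p
    simp only [pvInner_eq, pvMask, List.nil_append]
  rw [PySem.List.foldl_congr_mem _ _ _ _ (fun acc p _ => h3 acc p)]
  rw [pvOuterMap (fun p => pvMask tipo p.1 p.2) (PySem.List.enumerate matriz) [] 0]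
  simp

-- two strictly increasing integer lists with the same members are equal
theorem pvEqOfMemPairwise (l1 l2 : List Int) (h1 : l1.Pairwise (· < ·)) (h2 : l2.Pairwise (· < ·))
    (hm : ∀ x, x ∈ l1 ↔ x ∈ l2) : l1 = l2 := by
  have hp : l1.Perm l2 := (List.perm_ext_iff_of_nodup h1.nodup h2.nodup).2 hm
  exact hp.eq_of_pairwise (fun a b ha hb => le_antisymm) (h1.imp le_of_lt) (h2.imp le_of_lt)

-- pvCols is exactly the kept columns of the index range
theorem pvCols_eq (tipo : String) (i m : Int) :
    pvCols tipo i m = (PySem.List.pyRange 0 m 1).filter (fun j => pvKeep tipo i j) := by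
  have key : ∀ (c : List Int), c.Pairwise (· < ·) →
      (∀ x, x ∈ c ↔ (0 ≤ x ∧ x < m ∧ pvKeep tipo i x = true)) →
      c = (PySem.List.pyRange 0 m 1).filter (fun j => pvKeep tipo i j) := by
    intro c hc hm
    refine pvEqOfMemPairwise c _ hc ((PySem.List.pairwise_lt_pyRange_one 0 m).filter _) ?_
    intro x
    rw [hm x]
    simp [List.mem_filter, PySem.List.mem_pyRange_one]
    tauto
  by_cases ha : tipo = "a"
  · subst ha
    by_cases hi : i = 2
    · subst hi
      have hcols : pvCols "a" 2 m = PySem.List.pyRange 0 m 1 := by simp [pvCols]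
      rw [hcols]
      apply key _ (PySem.List.pairwise_lt_pyRange_one 0 m)
      intro x
      simp [PySem.List.mem_pyRange_one, pvKeep]
    · by_cases h2m : (2:Int) < m
      · have hcols : pvCols "a" i m = [2] := by simp [pvCols, hi, h2m]
        rw [hcols]
        apply key _ (by simp)
        intro x
        simp [pvKeep, hi]
        omega
      · have hcols : pvCols "a" i m = [] := by simp [pvCols, hi, h2m]
        rw [hcols]
        apply key _ (by simp)
        intro x
        simp [pvKeep, hi]
        omega
  · by_cases hb : tipo = "b"
    · subst hb
      by_cases hi : i = 0 ∨ i = 4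
      · have hcols : pvCols "b" i m = PySem.List.pyRange 0 m 1 := by
          rcases hi with h | h <;> simp [pvCols, h]
        rw [hcols]
        apply key _ (PySem.List.pairwise_lt_pyRange_one 0 m)
        intro x
        simp [PySem.List.mem_pyRange_one, pvKeep]
        rcases hi with h | h <;> simp [h]
      · have hi := not_or.1 hi
        have hcols : pvCols "b" i m = [0, 4].filter (fun c => c < m) := by
          unfold pvCols
          rw [if_neg (by decide), if_pos rfl, if_neg (by simp [hi.1, hi.2])]
        rw [hcols]
        apply key _ (List.Pairwise.filter _ (by decide : ([0,4] : List Int).Pairwise (· < ·)))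
        intro x
        simp [List.mem_filter, pvKeep, hi.1, hi.2]
        omega
    · by_cases hc : tipo = "c"
      · subst hc
        by_cases hi : i = 2
        · subst hi
          have hcols : pvCols "c" 2 m = [2].filter (fun j => 0 ≤ j && j < m) := by
            simp [pvCols]
          rw [hcols]
          apply key _ (List.Pairwise.filter _ (by simp : ([2] : List Int).Pairwise (· < ·)))
          intro x
          simp [List.mem_filter, pvKeep]
          omega
        · have hcols : pvCols "c" i m = [min i (4-i), max i (4-i)].filter (fun j => 0 ≤ j && j < m) := by
            simp [pvCols, show ¬ (i = 4 - i) by omega]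
          rw [hcols]
          apply key _ (List.Pairwise.filter _ (by simp; omega : ([min i (4-i), max i (4-i)] : List Int).Pairwise (· < ·)))
          intro x
          simp [List.mem_filter, pvKeep]
          omega
      · by_cases hd : tipo = "d"
        · subst hd
          have hcols : pvCols "d" i m = PySem.List.pyRange (PySem.Int.mod i 2) m 2 := by
            simp [pvCols]
          rw [hcols]
          have h2 : (0:Int) < 2 := by norm_num
          apply key
          · rw [PySem.List.pyRange_of_pos _ _ h2]
            exact List.Pairwise.map _ (by intro a b hab; omega) List.pairwise_lt_range
          · intro x
            have hkeep : (pvKeep "d" i x = true) ↔ PySem.Int.mod (i + x) 2 = 0 := by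
              simp [pvKeep]
            rw [PySem.List.mem_pyRange_iff_of_pos h2, hkeep,
                PySem.Int.mod_eq_emod_of_pos h2, PySem.Int.mod_eq_emod_of_pos h2]
            omega
        · have hcols : pvCols tipo i m = [] := by simp [pvCols, ha, hb, hc, hd]
          rw [hcols]
          apply key _ (by simp)
          intro x
          simp [pvKeep, ha, hb, hc, hd]


-- the scatter loop: second component accumulates the values at the scattered indices
theorem pvScatter_snd (row : List Int) :
    ∀ (cols : List Int) (b : List Int) (s : Int),
    (cols.foldl
      (fun (st2 : List Int × Int) j =>
        (PySem.List.pySetD st2.1 j (PySem.List.pyGetD row j 0),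
         st2.2 + PySem.List.pyGetD row j 0))
      (b, s)).2
    = s + (cols.map (fun j => PySem.List.pyGetD row j 0)).sum := by
  intro cols
  induction cols with
  | nil => intro b s; simp
  | cons j cols ih => intro b s; simp only [List.foldl_cons, List.map_cons, List.sum_cons]; rw [ih]; ring

theorem pvScatter_len (row : List Int) :
    ∀ (cols : List Int) (b : List Int) (s : Int),
    ((cols.foldl
      (fun (st2 : List Int × Int) j =>
        (PySem.List.pySetD st2.1 j (PySem.List.pyGetD row j 0),
         st2.2 + PySem.List.pyGetD row j 0))
      (b, s)).1).length = b.length := by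
  intro cols
  induction cols with
  | nil => intro b s; rfl
  | cons j cols ih => intro b s; simp only [List.foldl_cons]; rw [ih, PySem.List.length_pySetD]

theorem pvScatter_get (row : List Int) :
    ∀ (cols : List Int) (b : List Int) (s : Int) (k : Nat),
    (∀ j ∈ cols, 0 ≤ j) → k < b.length →
    ((cols.foldl
      (fun (st2 : List Int × Int) j =>
        (PySem.List.pySetD st2.1 j (PySem.List.pyGetD row j 0),
         st2.2 + PySem.List.pyGetD row j 0))
      (b, s)).1).getD k 0
    = if (k : Int) ∈ cols then PySem.List.pyGetD row (k : Int) 0 else b.getD k 0 := by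
  intro cols
  induction cols with
  | nil => intro b s k _ _; simp
  | cons j cols ih =>
      intro b s k hpos hk
      have hj : 0 ≤ j := hpos j (List.mem_cons_self)
      simp only [List.foldl_cons]
      rw [PySem.List.pySetD_of_nonneg _ _ hj]
      rw [ih _ _ k (fun x hx => hpos x (List.mem_cons_of_mem _ hx)) (by simpa using hk)]
      have hset : (b.set j.toNat (PySem.List.pyGetD row j 0)).getD k 0
          = if j.toNat = k then PySem.List.pyGetD row j 0 else b.getD k 0 := by
        rw [List.getD_eq_getElem _ _ (by simpa using hk), List.getElem_set,
            List.getD_eq_getElem _ _ hk]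
      rw [hset]
      by_cases h1 : (k : Int) ∈ cols
      · simp [h1]
      · by_cases h2 : j.toNat = k
        · have hjk : j = (k : Int) := by omega
          simp [h1, hjk, List.mem_cons]
        · have hmem : ¬ ((k : Int) ∈ j :: cols) := by
            simp only [List.mem_cons]
            push Not
            exact ⟨by omega, h1⟩
          rw [if_neg h1, if_neg h2, if_neg hmem]


theorem pvSumIteFilter (f : Int → Int) (p : Int → Bool) (l : List Int) :
    ((l.filter p).map f).sum = (l.map (fun x => if p x then f x else 0)).sum := by
  induction l with
  | nil => simp
  | cons x l ih => by_cases h : p x <;> simp [h, ih]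

-- one row of B: scattering pvCols into a zero row yields the masked row and its sum
theorem pvScatter_row (tipo : String) (i : Int) (row : List Int) (s : Int) :
    (pvCols tipo i (PySem.List.len row)).foldl
      (fun (st2 : List Int × Int) j =>
        (PySem.List.pySetD st2.1 j (PySem.List.pyGetD row j 0),
         st2.2 + PySem.List.pyGetD row j 0))
      (List.replicate row.length 0, s)
    = (pvMask tipo i row, s + (pvMask tipo i row).sum) := by
  rw [pvCols_eq]
  have hmask : pvMask tipo i row
      = (PySem.List.pyRange 0 (PySem.List.len row) 1).map
          (fun j => if pvKeep tipo i j then PySem.List.pyGetD row j 0 else 0) := by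
    unfold pvMask
    rw [PySem.List.enumerate_eq_map_pyRange row 0, List.map_map]
    rfl
  have hpos : ∀ j ∈ (PySem.List.pyRange 0 (PySem.List.len row) 1).filter (fun j => pvKeep tipo i j), 0 ≤ j := by
    intro j hj
    have := (List.mem_filter.1 hj).1
    rw [PySem.List.mem_pyRange_one] at this
    exact this.1
  rw [Prod.ext_iff]
  constructor
  · apply List.ext_getElem
    · rw [pvScatter_len, hmask, List.length_map, PySem.List.length_pyRange_one,
          List.length_replicate]
      simp
    · intro k h1 h2
      rw [← List.getD_eq_getElem _ 0 h1, ← List.getD_eq_getElem _ 0 h2]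
      rw [pvScatter_get row _ _ _ k hpos (by simpa using (by simpa [pvScatter_len] using h1))]
      have hkm : k < row.length := by
        have := h1
        rw [pvScatter_len, List.length_replicate] at this
        exact this
      have hrhs : (pvMask tipo i row).getD k 0
          = if pvKeep tipo i (k : Int) then PySem.List.pyGetD row (k : Int) 0 else 0 := by
        rw [hmask]
        unfold List.getD
        rw [PySem.List.len_eq, PySem.List.getElem?_map_pyRange_zero _ row.length k hkm]
        rfl
      rw [hrhs]
      by_cases hkeep : pvKeep tipo i (k : Int)
      · have hmem : (k : Int) ∈ (PySem.List.pyRange 0 (PySem.List.len row) 1).filter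
            (fun j => pvKeep tipo i j) := by
          rw [List.mem_filter, PySem.List.mem_pyRange_one, PySem.List.len_eq]
          exact ⟨⟨Int.natCast_nonneg k, by exact_mod_cast hkm⟩, by simpa using hkeep⟩
        rw [if_pos hkeep, if_pos hmem]
      · have hnot : ¬ ((k : Int) ∈ (PySem.List.pyRange 0 (PySem.List.len row) 1).filter
            (fun j => pvKeep tipo i j)) := by
          intro hcontra
          exact hkeep (by simpa using (List.mem_filter.1 hcontra).2)
        rw [if_neg hkeep, if_neg hnot]
        simp
  · rw [pvScatter_snd, hmask, ← pvSumIteFilter]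

-- B in the same closed form
theorem pvB_closed (matriz : List (List Int)) (tipo : String) :
    filtrar_matriz_alt matriz tipo
    = ((PySem.List.enumerate matriz).map (fun p => pvMask tipo p.1 p.2),
       (((PySem.List.enumerate matriz).map (fun p => pvMask tipo p.1 p.2)).map List.sum).sum) := by
  unfold filtrar_matriz_alt
  have hstep : ∀ (st : List (List Int) × Int) (p : Int × List Int),
      (fun (st : List (List Int) × Int) (p : Int × List Int) =>
        let nova_soma :=
          (pvCols tipo p.1 (PySem.List.len p.2)).foldl
            (fun (st2 : List Int × Int) j =>
              (PySem.List.pySetD st2.1 j (PySem.List.pyGetD p.2 j 0),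
               st2.2 + PySem.List.pyGetD p.2 j 0))
            (List.replicate p.2.length 0, st.2)
        (st.1 ++ [nova_soma.1], nova_soma.2)) st p
      = (st.1 ++ [pvMask tipo p.1 p.2], st.2 + (pvMask tipo p.1 p.2).sum) := by
    intro st p
    simp only [pvScatter_row]
  rw [PySem.List.foldl_congr_mem _ _ _ _ (fun acc p _ => hstep acc p)]
  rw [pvOuterMap (fun p => pvMask tipo p.1 p.2) (PySem.List.enumerate matriz) [] 0]
  simp

-- ===== VERDICT (by name: the statement is the Claim_ definition above) =====
theorem filtrar_matriz_spec : Claim_equal_filtrar_matriz := by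
  intro matriz tipo _
  show filtrar_matriz matriz tipo = filtrar_matriz_alt matriz tipo
  rw [pvA_closed, pvB_closed]
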